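-- pv_equiv track=rewrite | github.com/mit1280/primelibpy | Prime.py | getReversiblePrime
-- ===== SOURCE A (Python) =====
-- def getReversiblePrime(startLimit,endLimit):
--     l1=[]
--     x,y=startLimit,endLimit
--     if x<12:
--         x=12
--     for a in range(x,y+1):
--         k=0
--         sum=0
--         for i in range(2,int(a/2)+1):
--             if(a%i==0):
--                 k=k+1
--                 break
--         if(k<=0):
--
--             num=a
--             q=0
--             p=[]
--             while(num>0):
--                 rem=num%10
--                 p.append(rem)
--                 num=int(num/10)
--                 q+=1
--                 m=0
--             while(q>0):
--                 sum=sum+p[m]*(10**q)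
--                 m+=1
--                 q-=1
--             sum=int(sum/10)
--             k=0
--         for i in range(2,int(sum/2)+1):
--             if(sum%i==0):
--                 k=k+1
--                 break
--         if(k<=0):
--             l1.append(a)
--     return(l1)
-- ===== SOURCE B (Python) =====
-- def getReversiblePrime(startLimit, endLimit):
--     start = startLimit if startLimit >= 12 else 12
--     if endLimit < start:
--         return []
--     # smallest number of the form 10**k - 1 that is >= endLimit; it bounds every digit reversal
--     m = 9
--     while m < endLimit:
--         m = 10 * m + 9
--     # sieve: sieve[j] is True iff j has no divisor d with 2 <= d <= j // 2
--     sieve = [False, False] + [True] * (m - 1)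
--     for i in range(2, m // 2 + 1):
--         for j in range(2 * i, m + 1, i):
--             sieve[j] = False
--     res = []
--     for a in range(start, endLimit + 1):
--         r, n = 0, a
--         while n > 0:
--             r = 10 * r + n % 10
--             n //= 10
--         if sieve[a] and sieve[r]:
--             res.append(a)
--     return res
-- ===== Notes on version B (the rewrite author's own statement) =====
-- stated objective: alternative
-- what changed: Per-number trial division up to a/2 (run on a and on its digit-list positional reversal) is replaced by one composite-marking sieve built up to the smallest 10^k-1 >= endLimit, plus an accumulator-style arithmetic digit reversal; each candidate becomes two table lookups, but the sieve's size is driven by endLimit, so B is not uniformly faster on narrow ranges with a huge endLimit.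
import Mathlib
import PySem

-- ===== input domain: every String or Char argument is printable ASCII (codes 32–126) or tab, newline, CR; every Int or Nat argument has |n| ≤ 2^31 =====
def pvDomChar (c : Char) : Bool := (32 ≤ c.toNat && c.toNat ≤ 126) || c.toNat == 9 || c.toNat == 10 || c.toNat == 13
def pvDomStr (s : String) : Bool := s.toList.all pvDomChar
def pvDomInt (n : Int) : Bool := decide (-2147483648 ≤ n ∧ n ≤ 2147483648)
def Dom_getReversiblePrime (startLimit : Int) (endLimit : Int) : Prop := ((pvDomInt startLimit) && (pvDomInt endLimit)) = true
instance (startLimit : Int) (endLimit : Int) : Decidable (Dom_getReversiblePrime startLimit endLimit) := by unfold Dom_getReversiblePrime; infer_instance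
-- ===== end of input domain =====

-- B replaces A's per-number trial division (up to a/2, plus a digit-list reversal) by one composite
-- sieve up to the smallest 10^k-1 ≥ endLimit and an arithmetic digit reversal; return value only.

-- ===== PORT A =====
-- the trial-division loop A runs twice (on a and on sum); `int(n/2)` is truncdiv
def aTrial (n : Int) : Bool :=
  (PySem.List.pyRange 2 (PySem.Int.truncdiv n 2 + 1) 1).any (fun i => PySem.Int.mod n i == 0)

-- `while(num>0): rem=num%10; p.append(rem); num=int(num/10); q+=1; m=0` — m=0 folded out (a>0 so it always ends 0)
def aDigits (num : Int) (p : List Int) (q : Int) : List Int × Int :=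
  if h : num > 0 then aDigits (PySem.Int.truncdiv num 10) (p ++ [PySem.Int.mod num 10]) (q + 1)
  else (p, q)
termination_by num.toNat
decreasing_by
  have h10 : PySem.Int.truncdiv num 10 = num / 10 := Int.tdiv_eq_ediv_of_nonneg (by omega)
  rw [h10]; omega

-- `while(q>0): sum=sum+p[m]*(10**q); m+=1; q-=1`; p[m] is always in range (q = len p, m counts up)
def aSum (q : Int) (p : List Int) (m : Int) (sum : Int) : Int :=
  if h : q > 0 then aSum (q - 1) p (m + 1) (sum + PySem.List.pyGetD p m 0 * 10 ^ q.toNat)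
  else sum
termination_by q.toNat
decreasing_by omega

def getReversiblePrime (startLimit : Int) (endLimit : Int) : List Int :=
  let x := if startLimit < 12 then 12 else startLimit
  (PySem.List.pyRange x (endLimit + 1) 1).foldl
    (fun l1 a =>
      let k : Int := if aTrial a then 1 else 0
      let sum : Int := 0
      let sk : Int × Int :=
        if k ≤ 0 then
          let pq := aDigits a [] 0
          let s0 := aSum pq.2 pq.1 0 0
          (PySem.Int.truncdiv s0 10, 0)
        else (sum, k)
      let k2 : Int := sk.2 + (if aTrial sk.1 then 1 else 0)
      if k2 ≤ 0 then l1 ++ [a] else l1)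
    []

-- ===== PORT B =====
-- `r, n = 0, a; while n > 0: r = 10*r + n%10; n //= 10`
def bRev (n : Int) (r : Int) : Int :=
  if h : n > 0 then bRev (PySem.Int.floordiv n 10) (10 * r + PySem.Int.mod n 10) else r
termination_by n.toNat
decreasing_by
  have h10 : PySem.Int.floordiv n 10 = n / 10 := PySem.Int.floordiv_eq_ediv_of_pos (by omega)
  rw [h10]; omega

-- `m = 9; while m < endLimit: m = 10*m + 9` (m stays a natural number, starting at 9)
def bM (e : Int) (m : Nat) : Nat :=
  if h : (m : Int) < e then bM e (10 * m + 9) else m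
termination_by (e - m).toNat
decreasing_by omega

-- `sieve = [False, False] + [True] * (m - 1)`
def bInit (m : Nat) : Array Bool := #[false, false] ++ Array.replicate (m - 1) true

-- `for j in range(2*i, m+1, i): sieve[j] = False` (every written index is in range)
def bMark (m : Nat) (i : Int) (s : Array Bool) : Array Bool :=
  (PySem.List.pyRange (2 * i) ((m : Int) + 1) i).foldl (fun s j => s.setIfInBounds j.toNat false) s

-- `for i in range(2, m//2 + 1): …`
def bSieve (m : Nat) : Array Bool :=
  (PySem.List.pyRange 2 (PySem.Int.floordiv (m : Int) 2 + 1) 1).foldl (fun s i => bMark m i s) (bInit m)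

def getReversiblePrime_alt (startLimit : Int) (endLimit : Int) : List Int :=
  let start := if startLimit ≥ 12 then startLimit else 12
  if endLimit < start then []
  else
    let m := bM endLimit 9
    let sieve := bSieve m
    (PySem.List.pyRange start (endLimit + 1) 1).foldl
      (fun res a =>
        if sieve.getD a.toNat false && sieve.getD (bRev a 0).toNat false then res ++ [a] else res)
      []

-- ===== PRECONDITION & SPEC =====
def Spec_getReversiblePrime (startLimit : Int) (endLimit : Int) (out : List Int) : Prop := out = getReversiblePrime_alt startLimit endLimit
instance (startLimit : Int) (endLimit : Int) (out : List Int) : Decidable (Spec_getReversiblePrime startLimit endLimit out) := by unfold Spec_getReversiblePrime; infer_instance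

-- ===== CLAIM (what is proved, stated in full; the proofs are below) =====
def Claim_equal_getReversiblePrime : Prop := ∀ (startLimit : Int) (endLimit : Int), Dom_getReversiblePrime startLimit endLimit → Spec_getReversiblePrime startLimit endLimit (getReversiblePrime startLimit endLimit)

-- ===== LEMMAS AND PROOFS =====

-- n has a divisor d with 2 <= d <= n/2 (the property both trial division and the sieve decide)
def HasDiv (n : Int) : Prop := ∃ d : Int, 2 ≤ d ∧ 2 * d ≤ n ∧ d ∣ n

lemma trial_iff (n : Int) (hn : 0 ≤ n) : aTrial n = true ↔ HasDiv n := by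
  unfold aTrial HasDiv
  rw [List.any_eq_true]
  constructor
  · rintro ⟨i, hi, hmod⟩
    rw [PySem.List.mem_pyRange_one] at hi
    refine ⟨i, hi.1, ?_, ?_⟩
    · have h2 : i ≤ PySem.Int.truncdiv n 2 := by omega
      rw [show PySem.Int.truncdiv n 2 = n / 2 from Int.tdiv_eq_ediv_of_nonneg hn] at h2
      have := (Int.le_ediv_iff_mul_le (by norm_num : (0:Int) < 2)).mp h2
      omega
    · simpa [PySem.Int.mod_eq_zero_iff_dvd] using hmod
  · rintro ⟨d, hd2, hdn, hdvd⟩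
    refine ⟨d, ?_, by simpa [PySem.Int.mod_eq_zero_iff_dvd] using hdvd⟩
    rw [PySem.List.mem_pyRange_one]
    refine ⟨hd2, ?_⟩
    have : d ≤ PySem.Int.truncdiv n 2 := by
      rw [show PySem.Int.truncdiv n 2 = n / 2 from Int.tdiv_eq_ediv_of_nonneg hn]
      exact (Int.le_ediv_iff_mul_le (by norm_num : (0:Int) < 2)).mpr (by omega)
    omega

def dI (n : Nat) : List Int :=
  if h : n = 0 then [] else ((n % 10 : Nat) : Int) :: dI (n / 10)
termination_by n
decreasing_by exact Nat.div_lt_self (Nat.pos_of_ne_zero h) (by norm_num)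

def revF (r d : Int) : Int := 10 * r + d

lemma dI_mem (n : Nat) : ∀ d ∈ dI n, 0 ≤ d ∧ d ≤ 9 := by
  induction n using Nat.strong_induction_on with
  | _ n ih =>
    rw [dI]
    split
    · simp
    · rename_i h
      intro d hd
      rcases List.mem_cons.mp hd with h1 | h1
      · subst h1
        have := Nat.mod_lt n (show 0 < 10 by norm_num)
        constructor
        · positivity
        · exact_mod_cast Nat.le_of_lt_succ this
      · exact ih (n / 10) (Nat.div_lt_self (Nat.pos_of_ne_zero h) (by norm_num)) d h1

lemma dI_len_le (k : Nat) : ∀ n : Nat, n < 10 ^ k → (dI n).length ≤ k := by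
  induction k with
  | zero =>
    intro n hn
    interval_cases n
    rw [dI]; simp
  | succ k ih =>
    intro n hn
    rw [dI]
    split
    · simp
    · rename_i h
      simp only [List.length_cons]
      have : n / 10 < 10 ^ k := by
        rw [Nat.div_lt_iff_lt_mul (by norm_num)]
        calc n < 10 ^ (k+1) := hn
        _ = 10 ^ k * 10 := by ring
      exact Nat.succ_le_succ (ih _ this)

lemma dI_ne_nil (n : Nat) (h : 0 < n) : dI n ≠ [] := by
  rw [dI]; split
  · omega
  · simp

lemma foldl_revF_shift (l : List Int) : ∀ r : Int,
    l.foldl revF r = r * 10 ^ l.length + l.foldl revF 0 := by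
  induction l with
  | nil => intro r; simp
  | cons d tl ih =>
    intro r
    simp only [List.foldl_cons, List.length_cons]
    rw [ih (revF r d), ih (revF 0 d)]
    simp only [revF]
    ring

lemma foldl_revF_nonneg (l : List Int) (hl : ∀ d ∈ l, 0 ≤ d) : 0 ≤ l.foldl revF 0 := by
  induction l with
  | nil => simp
  | cons d tl ih =>
    simp only [List.foldl_cons]
    rw [foldl_revF_shift]
    have hd : 0 ≤ d := hl d (by simp)
    have htl : 0 ≤ tl.foldl revF 0 := ih (fun x hx => hl x (by simp [hx]))
    have : 0 ≤ revF 0 d * 10 ^ tl.length := by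
      apply mul_nonneg
      · simp [revF]; omega
      · positivity
    omega

lemma foldl_revF_lt (l : List Int) (hl : ∀ d ∈ l, 0 ≤ d ∧ d ≤ 9) :
    l.foldl revF 0 ≤ 10 ^ l.length - 1 := by
  induction l with
  | nil => simp
  | cons d tl ih =>
    simp only [List.foldl_cons, List.length_cons]
    rw [foldl_revF_shift]
    have hd := hl d (by simp)
    have htl := ih (fun x hx => hl x (by simp [hx]))
    have h1 : revF 0 d * 10 ^ tl.length ≤ 9 * 10 ^ tl.length := by
      apply mul_le_mul_of_nonneg_right _ (by positivity)
      simp [revF]; omega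
    have h2 : (10:Int) ^ (tl.length + 1) = 10 * 10 ^ tl.length := by ring
    omega
lemma aDigits_eq_aux : ∀ (k : Nat) (num : Int), num.toNat ≤ k → 0 ≤ num → ∀ (p : List Int) (q : Int),
    aDigits num p q = (p ++ dI num.toNat, q + (dI num.toNat).length) := by
  intro k
  induction k with
  | zero =>
    intro num hk hn p q
    have : num = 0 := by omega
    subst this
    rw [aDigits, dI]
    simp
  | succ k ih =>
    intro num hk hn p q
    rw [aDigits]
    split
    · rename_i h
      have hdiv : PySem.Int.truncdiv num 10 = num / 10 := Int.tdiv_eq_ediv_of_nonneg hn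
      have hmod : PySem.Int.mod num 10 = num % 10 := PySem.Int.mod_eq_emod_of_pos (by norm_num)
      rw [hdiv, hmod, ih (num / 10) (by omega) (by omega)]
      rw [show dI num.toNat = ((num.toNat % 10 : Nat) : Int) :: dI (num.toNat / 10) by
        rw [dI]; simp only [show ¬ (num.toNat = 0) by omega]; simp]
      have e1 : ((num.toNat % 10 : Nat) : Int) = num % 10 := by omega
      have e2 : (num / 10).toNat = num.toNat / 10 := by omega
      rw [e1, e2]
      simp only [List.length_cons, List.append_assoc, List.singleton_append]
      refine Prod.ext rfl ?_
      push_cast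
      ring
    · rename_i h
      have : num = 0 := by omega
      subst this
      rw [dI]
      simp

lemma bRev_eq_aux : ∀ (k : Nat) (n : Int), n.toNat ≤ k → 0 ≤ n → ∀ r : Int,
    bRev n r = (dI n.toNat).foldl revF r := by
  intro k
  induction k with
  | zero =>
    intro n hk hn r
    have : n = 0 := by omega
    subst this
    rw [bRev, dI]; simp
  | succ k ih =>
    intro n hk hn r
    rw [bRev]
    split
    · rename_i h
      have hdiv : PySem.Int.floordiv n 10 = n / 10 := PySem.Int.floordiv_eq_ediv_of_pos (by norm_num)
      have hmod : PySem.Int.mod n 10 = n % 10 := PySem.Int.mod_eq_emod_of_pos (by norm_num)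
      rw [hdiv, hmod, ih (n / 10) (by omega) (by omega)]
      rw [show dI n.toNat = ((n.toNat % 10 : Nat) : Int) :: dI (n.toNat / 10) by
        rw [dI]; simp only [show ¬ (n.toNat = 0) by omega]; simp]
      have e1 : ((n.toNat % 10 : Nat) : Int) = n % 10 := by omega
      have e2 : (n / 10).toNat = n.toNat / 10 := by omega
      rw [e1, e2]
      simp [revF]
    · rename_i h
      have : n = 0 := by omega
      subst this
      rw [dI]; simp

lemma aSum_eq (tl : List Int) : ∀ (pre : List Int) (sum : Int),
    aSum (tl.length : Int) (pre ++ tl) (pre.length : Int) sum = sum + 10 * tl.foldl revF 0 := by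
  induction tl with
  | nil =>
    intro pre sum
    rw [aSum]
    simp
  | cons d rest ih =>
    intro pre sum
    rw [aSum]
    simp only [List.length_cons, show ((rest.length + 1 : Nat) : Int) > 0 by omega, dif_pos]
    have hidx : PySem.List.pyGetD (pre ++ d :: rest) ((pre.length : Nat) : Int) 0 = d := by
      rw [PySem.List.pyGetD_natCast]
      simp [List.getD_eq_getElem?_getD]
    have harg : ((rest.length + 1 : Nat) : Int) - 1 = (rest.length : Int) := by push_cast; ring
    have hpre : (pre.length : Int) + 1 = (((pre ++ [d]).length : Nat) : Int) := by simp
    rw [hidx, harg, hpre, show pre ++ d :: rest = (pre ++ [d]) ++ rest by simp]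
    rw [ih (pre ++ [d]) _]
    have : (rest.foldl revF (revF 0 d)) = d * 10 ^ rest.length + rest.foldl revF 0 := by
      rw [foldl_revF_shift]
      simp [revF]
    simp only [List.foldl_cons, this]
    have hq : (((rest.length + 1 : Nat) : Int)).toNat = rest.length + 1 := by omega
    rw [hq]
    ring
lemma bRev_eq (n : Int) (hn : 0 ≤ n) (r : Int) : bRev n r = (dI n.toNat).foldl revF r :=
  bRev_eq_aux n.toNat n le_rfl hn r

lemma rev_agree (a : Int) (ha : 0 < a) :
    PySem.Int.truncdiv (aSum (aDigits a [] 0).2 (aDigits a [] 0).1 0 0) 10 = bRev a 0 := by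
  rw [aDigits_eq_aux a.toNat a le_rfl (by omega)]
  simp only [List.nil_append, zero_add]
  have := aSum_eq (dI a.toNat) [] 0
  simp only [List.nil_append, List.length_nil, Int.natCast_zero, zero_add] at this
  rw [this]
  have hnn : 0 ≤ (dI a.toNat).foldl revF 0 :=
    foldl_revF_nonneg _ (fun d hd => (dI_mem _ d hd).1)
  rw [show PySem.Int.truncdiv (10 * (dI a.toNat).foldl revF 0) 10 = (dI a.toNat).foldl revF 0 by
    unfold PySem.Int.truncdiv
    rw [Int.tdiv_eq_ediv_of_nonneg (by omega)]
    exact Int.mul_ediv_cancel_left _ (by norm_num)]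
  rw [bRev_eq a (by omega) 0]

lemma bRev_le (a : Int) (k : Nat) (ha : 0 ≤ a) (h : a < 10 ^ k) : bRev a 0 ≤ 10 ^ k - 1 := by
  rw [bRev_eq a ha 0]
  have hlen : (dI a.toNat).length ≤ k := by
    apply dI_len_le
    have : (10:Int) ^ k = ((10 ^ k : Nat) : Int) := by push_cast; ring
    omega
  calc (dI a.toNat).foldl revF 0 ≤ 10 ^ (dI a.toNat).length - 1 := foldl_revF_lt _ (dI_mem _)
  _ ≤ 10 ^ k - 1 := by
      have := pow_le_pow_right₀ (show (1:Int) ≤ 10 by norm_num) hlen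
      omega

lemma bRev_ge_ten (a : Int) (ha : 12 ≤ a) (hnd : ¬ HasDiv a) : 10 ≤ bRev a 0 := by
  rw [bRev_eq a (by omega) 0]
  have ha0 : ¬ (a.toNat = 0) := by omega
  rw [show dI a.toNat = ((a.toNat % 10 : Nat) : Int) :: dI (a.toNat / 10) by
    rw [dI]; simp only [ha0]; simp]
  have hd0 : 1 ≤ ((a.toNat % 10 : Nat) : Int) := by
    by_contra hcon
    have : a % 10 = 0 := by omega
    exact hnd ⟨2, le_refl 2, by omega, by omega⟩
  simp only [List.foldl_cons]
  rw [foldl_revF_shift]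
  have hlen : 1 ≤ (dI (a.toNat / 10)).length := by
    have := dI_ne_nil (a.toNat / 10) (by omega)
    cases hdd : dI (a.toNat / 10) with
    | nil => exact absurd hdd this
    | cons x xs => simp
  have hnn : 0 ≤ (dI (a.toNat / 10)).foldl revF 0 :=
    foldl_revF_nonneg _ (fun d hd => (dI_mem _ d hd).1)
  have hpow : (10:Int) ≤ 10 ^ (dI (a.toNat / 10)).length := by
    calc (10:Int) = 10 ^ 1 := by norm_num
    _ ≤ 10 ^ (dI (a.toNat / 10)).length := by
        apply pow_le_pow_right₀ (by norm_num) (by omega)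
  have : revF 0 ((a.toNat % 10 : Nat) : Int) = ((a.toNat % 10 : Nat) : Int) := by simp [revF]
  rw [this]
  nlinarith

lemma bM_spec (e : Int) : ∀ m : Nat, 9 ≤ m → (∃ k : Nat, (m : Int) = 10 ^ k - 1) →
    9 ≤ bM e m ∧ e ≤ (bM e m : Int) ∧ ∃ k : Nat, ((bM e m : Nat) : Int) = 10 ^ k - 1 := by
  intro m
  induction m using bM.induct (e := e) with
  | case1 m h ih =>
    intro hm9 hk
    rw [bM, dif_pos h]
    refine ih ?_ ?_
    · omega
    · obtain ⟨k, hk⟩ := hk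
      refine ⟨k + 1, ?_⟩
      push_cast
      ring_nf
      ring_nf at hk
      omega
  | case2 m h =>
    intro hm9 hk
    rw [bM, dif_neg h]
    exact ⟨hm9, by omega, hk⟩
lemma foldl_set_getD (l : List Int) : ∀ (s : Array Bool) (t : Nat),
    ((l.foldl (fun s j => s.setIfInBounds j.toNat false) s).getD t false) =
      (s.getD t false && !(l.any (fun j => j.toNat == t))) := by
  induction l with
  | nil => intro s t; simp
  | cons j rest ih =>
    intro s t
    simp only [List.foldl_cons, List.any_cons, ih]
    have hstep : (s.setIfInBounds j.toNat false).getD t false = (s.getD t false && !(j.toNat == t)) := by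
      simp only [Array.getD_eq_getD_getElem?, Array.getElem?_setIfInBounds]
      by_cases h : j.toNat = t
      · subst h
        by_cases ht : j.toNat < s.size <;> simp [ht, Option.getD]
      · simp [h]
    rw [hstep]
    cases h1 : s.getD t false <;> cases h2 : (j.toNat == t) <;> simp

lemma bMark_getD (m : Nat) (i : Int) (s : Array Bool) (t : Nat) :
    (bMark m i s).getD t false =
      (s.getD t false && !((PySem.List.pyRange (2 * i) ((m : Int) + 1) i).any (fun j => j.toNat == t))) := by
  unfold bMark
  exact foldl_set_getD _ s t

lemma bSieve_getD (m : Nat) (t : Nat) :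
    (bSieve m).getD t false =
      ((bInit m).getD t false &&
        (PySem.List.pyRange 2 (PySem.Int.floordiv (m : Int) 2 + 1) 1).all
          (fun i => !((PySem.List.pyRange (2 * i) ((m : Int) + 1) i).any (fun j => j.toNat == t)))) := by
  unfold bSieve
  generalize bInit m = s0
  induction PySem.List.pyRange 2 (PySem.Int.floordiv (m : Int) 2 + 1) 1 generalizing s0 with
  | nil => simp
  | cons i rest ih =>
    simp only [List.foldl_cons, List.all_cons, ih, bMark_getD]
    cases s0.getD t false <;> simp

lemma bInit_getD (m : Nat) (hm : 1 ≤ m) (t : Nat) (ht : t ≤ m) :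
    (bInit m).getD t false = decide (2 ≤ t) := by
  unfold bInit
  have hsz : (#[false, false] ++ Array.replicate (m - 1) true).size = m + 1 := by
    simp; omega
  rw [Array.getD_eq_getD_getElem?, Array.getElem?_eq_getElem (by omega)]
  rcases Nat.lt_or_ge t 2 with h2 | h2
  · interval_cases t <;> simp
  · rw [Array.getElem_append_right (by simp; omega)]
    simp [h2]
lemma sieve_char (m : Nat) (hm : 9 ≤ m) (t : Int) (h2 : 2 ≤ t) (htm : t ≤ (m : Int)) :
    ((bSieve m).getD t.toNat false = true ↔ ¬ HasDiv t) := by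
  rw [bSieve_getD, bInit_getD m (by omega) t.toNat (by omega)]
  rw [show decide (2 ≤ t.toNat) = true by simp; omega]
  rw [Bool.true_and, List.all_eq_true]
  have hfd : PySem.Int.floordiv (m : Int) 2 = (m : Int) / 2 :=
    PySem.Int.floordiv_eq_ediv_of_pos (by norm_num)
  constructor
  · intro hall hdiv
    obtain ⟨d, hd2, hdt, hdvd⟩ := hdiv
    have hi : d ∈ PySem.List.pyRange 2 (PySem.Int.floordiv (m : Int) 2 + 1) 1 := by
      rw [PySem.List.mem_pyRange_one]
      refine ⟨hd2, ?_⟩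
      rw [hfd]
      have : d ≤ (m : Int) / 2 := (Int.le_ediv_iff_mul_le (by norm_num)).mpr (by omega)
      omega
    have := hall d hi
    rw [Bool.not_eq_true', List.any_eq_false] at this
    apply absurd (this t ?_)
    · simp
    · rw [PySem.List.mem_pyRange_iff_of_pos (by omega)]
      refine ⟨by omega, by omega, ?_⟩
      exact dvd_sub hdvd (Dvd.intro 2 (mul_comm _ _))
  · intro hnd i hi
    rw [PySem.List.mem_pyRange_one] at hi
    rw [Bool.not_eq_true', List.any_eq_false]
    intro j hj
    rw [PySem.List.mem_pyRange_iff_of_pos (by omega)] at hj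
    obtain ⟨hj1, hj2, hj3⟩ := hj
    have hij : i ∣ j := (Int.dvd_iff_dvd_of_dvd_sub hj3).mpr (Dvd.intro 2 (mul_comm _ _))
    simp only [beq_iff_eq]
    intro hcon
    have hjt : j = t := by omega
    exact hnd ⟨i, hi.1, by omega, hjt ▸ hij⟩
-- mirrors of the per-element state A computes (proof-side only)
def sA (a : Int) : Int × Int :=
  if (if aTrial a then (1:Int) else 0) ≤ 0 then
    (PySem.Int.truncdiv (aSum (aDigits a [] 0).2 (aDigits a [] 0).1 0 0) 10, 0)
  else ((0:Int), if aTrial a then (1:Int) else 0)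

def kA (a : Int) : Int := (sA a).2 + (if aTrial (sA a).1 then 1 else 0)

def pA (a : Int) : Bool := decide (kA a ≤ 0)

def pB (m : Nat) (a : Int) : Bool :=
  (bSieve m).getD a.toNat false && (bSieve m).getD (bRev a 0).toNat false

lemma pA_eq_pB (m : Nat) (k : Nat) (hm : 9 ≤ m) (hmk : ((m : Nat) : Int) = 10 ^ k - 1)
    (a : Int) (ha : 12 ≤ a) (ham : a ≤ (m : Int)) : pA a = pB m a := by
  by_cases hdiv : HasDiv a
  · have ht : aTrial a = true := (trial_iff a (by omega)).mpr hdiv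
    have hpa : pA a = false := by
      simp only [pA, kA, sA, ht, if_true]
      norm_num
      rw [show aTrial 0 = false from by decide]
      simp
    have hpb : (bSieve m).getD a.toNat false = false := by
      rcases hb : (bSieve m).getD a.toNat false with _ | _
      · rfl
      · exact absurd ((sieve_char m hm a (by omega) ham).mp hb) (by simpa using hdiv)
    simp [hpa, pB, hpb]
  · have ht : aTrial a = false := by
      rcases hb : aTrial a with _ | _
      · rfl
      · exact absurd ((trial_iff a (by omega)).mp hb) hdiv
    have hsa : sA a = (bRev a 0, 0) := by
      simp only [sA, ht]
      norm_num
      exact rev_agree a (by omega)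
    obtain ⟨k', hk'⟩ : ∃ k', (10:Int) ^ k' - 1 = (m : Int) := ⟨k, hmk.symm⟩
    have hrev_le : bRev a 0 ≤ (m : Int) := by
      rw [← hk']
      exact bRev_le a k' (by omega) (by omega)
    have hrev_ge : 10 ≤ bRev a 0 := bRev_ge_ten a ha hdiv
    have hsieve_a : (bSieve m).getD a.toNat false = true :=
      (sieve_char m hm a (by omega) ham).mpr hdiv
    have hiff : (bSieve m).getD (bRev a 0).toNat false = true ↔ ¬ HasDiv (bRev a 0) :=
      sieve_char m hm (bRev a 0) (by omega) hrev_le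
    have htr : aTrial (bRev a 0) = true ↔ HasDiv (bRev a 0) := trial_iff _ (by omega)
    simp only [pA, kA, hsa, pB, hsieve_a, Bool.true_and]
    rcases hb : (bSieve m).getD (bRev a 0).toNat false with _ | _
    · have : HasDiv (bRev a 0) := by
        by_contra hc
        rw [← hiff] at hc
        simp [hb] at hc
      rw [htr.mpr this]
      simp
    · have : ¬ HasDiv (bRev a 0) := hiff.mp hb
      have : aTrial (bRev a 0) = false := by
        rcases h2 : aTrial (bRev a 0) with _ | _
        · rfl
        · exact absurd (htr.mp h2) this
      rw [this]
      simp
-- ===== VERDICT (by name: the statement is the Claim_ definition above) =====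
theorem getReversiblePrime_spec : Claim_equal_getReversiblePrime := by
  intro s e _
  show getReversiblePrime s e = getReversiblePrime_alt s e
  have hmain : (PySem.List.pyRange (if s < 12 then (12:Int) else s) (e + 1) 1).foldl
      (fun l1 a => if kA a ≤ 0 then l1 ++ [a] else l1) [] =
      (if e < (if s ≥ 12 then s else 12) then ([] : List Int)
       else (PySem.List.pyRange (if s ≥ 12 then s else 12) (e + 1) 1).foldl
         (fun res a => if pB (bM e 9) a then res ++ [a] else res) []) := by
    have hx : (if s < 12 then (12:Int) else s) = (if s ≥ 12 then s else 12) := by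
      split_ifs <;> omega
    rw [hx]
    set x := if s ≥ 12 then s else 12 with hxdef
    have hx12 : 12 ≤ x := by rw [hxdef]; split_ifs <;> omega
    by_cases he : e < x
    · rw [if_pos he]
      rw [show PySem.List.pyRange x (e + 1) 1 = [] by
        rw [PySem.List.pyRange_of_pos _ _ (by norm_num : (0:Int) < 1), if_neg (by omega)]
        simp]
      simp
    · rw [if_neg he]
      obtain ⟨hm9, hem, k, hmk⟩ := bM_spec e 9 (le_refl 9) ⟨1, by norm_num⟩
      have hA : (PySem.List.pyRange x (e + 1) 1).foldl
          (fun l1 a => if kA a ≤ 0 then l1 ++ [a] else l1) [] =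
          [] ++ ((PySem.List.pyRange x (e + 1) 1).filter pA).map id := by
        rw [← PySem.List.foldl_append_if pA id]
        apply PySem.List.foldl_congr_mem
        intro acc a _
        simp only [pA, id, decide_eq_true_eq]
      have hB : (PySem.List.pyRange x (e + 1) 1).foldl
          (fun res a => if pB (bM e 9) a then res ++ [a] else res) [] =
          [] ++ ((PySem.List.pyRange x (e + 1) 1).filter (pB (bM e 9))).map id := by
        rw [← PySem.List.foldl_append_if (pB (bM e 9)) id]
        apply PySem.List.foldl_congr_mem
        intro acc a _
        rfl
      have hpq : ∀ a ∈ PySem.List.pyRange x (e + 1) 1, pA a = pB (bM e 9) a := by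
        intro a haRange
        rw [PySem.List.mem_pyRange_one] at haRange
        exact pA_eq_pB (bM e 9) k hm9 hmk a (by omega) (by omega)
      rw [hA, hB, List.filter_congr hpq]
  exact hmain
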